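-- pv_equiv track=rewrite | github.com/patelrajnath/wikipedia2vec | wikipedia2vec/utils/wiki_parser.py | list_rstrip
-- ===== SOURCE A (Python) =====
-- def list_rstrip(l: list):
--     if len(l) == 0:
--         return []
--
--     last = l[-1]
--     if isinstance(last, str):
--         last = last.rstrip()
--         if last == '':
--             return list_rstrip(l[:-1])
--         else:
--             return [*l[:-1], last]
--     else:
--         return l
-- ===== SOURCE B (Python) =====
-- def list_rstrip(l: list):
--     keep = 0
--     for idx, x in enumerate(l):
--         if not (isinstance(x, str) and x.rstrip() == ''):
--             keep = idx + 1
--     if keep == 0: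
--         return []
--     result = list(l[:keep])
--     if isinstance(result[-1], str):
--         result[-1] = result[-1].rstrip()
--     return result
-- ===== Notes on version B (the rewrite author's own statement) =====
-- stated objective: alternative
-- what changed: Single forward pass computing the last significant index, then one slice with the final element rstripped, instead of A's recursion peeling whitespace-only elements from the back; it trades A's early stop at the last significant element for one full forward scan.
import Mathlib
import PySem

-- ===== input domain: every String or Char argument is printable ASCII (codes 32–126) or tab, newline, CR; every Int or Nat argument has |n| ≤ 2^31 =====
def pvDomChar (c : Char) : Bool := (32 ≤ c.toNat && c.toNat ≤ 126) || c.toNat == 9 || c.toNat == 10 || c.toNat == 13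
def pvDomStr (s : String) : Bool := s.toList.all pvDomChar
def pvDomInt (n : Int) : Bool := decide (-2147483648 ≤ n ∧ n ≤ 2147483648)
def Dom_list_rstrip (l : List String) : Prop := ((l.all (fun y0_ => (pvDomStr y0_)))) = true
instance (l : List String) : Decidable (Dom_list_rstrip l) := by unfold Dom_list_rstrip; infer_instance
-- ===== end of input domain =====

-- B computes the last significant index in one forward pass and slices once,
-- instead of A's back-to-front recursion; an alternative decomposition, not claimed faster.

-- ===== PORT A =====
-- A peels whitespace-only strings from the back recursively; on List String the
-- isinstance(last, str) test is always true, so its else-branch is unreachable.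
def list_rstrip (l : List String) : List String :=
  if _h : l.length = 0 then []
  else
    -- l[-1]; l is nonempty here so pyGet? is some, getD "" is never taken
    let last := (PySem.List.pyGet? l (-1)).getD ""
    let last' := PySem.Str.rstrip last
    if last' = "" then list_rstrip (PySem.List.slice l none (some (-1)))
    else PySem.List.slice l none (some (-1)) ++ [last']
termination_by l.length
decreasing_by
  simp [PySem.List.slice_to_neg_one, List.length_dropLast]; omega

-- ===== PORT B =====
def list_rstrip_alt (l : List String) : List String :=
  let keep : Int := (PySem.List.enumerate l).foldl
    (fun k p => if ¬ (PySem.Str.rstrip p.2 = "") then p.1 + 1 else k) 0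
  if keep = 0 then []
  else
    let result := PySem.List.slice l none (some keep)
    -- result[-1] = result[-1].rstrip(); result is nonempty since keep ≠ 0
    result.dropLast ++ [PySem.Str.rstrip (result.getLast?.getD "")]

-- ===== PRECONDITION & SPEC =====
def Spec_list_rstrip (l : List String) (out : List String) : Prop := out = list_rstrip_alt l
instance (l : List String) (out : List String) : Decidable (Spec_list_rstrip l out) := by unfold Spec_list_rstrip; infer_instance

-- ===== CLAIM (what is proved, stated in full; the proofs are below) =====
def Claim_equal_list_rstrip : Prop := ∀ (l : List String), Dom_list_rstrip l → Spec_list_rstrip l (list_rstrip l)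

-- ===== LEMMAS AND PROOFS =====

def kf (l : List String) : Int :=
  (PySem.List.enumerate l).foldl
    (fun k p => if ¬ (PySem.Str.rstrip p.2 = "") then p.1 + 1 else k) 0

theorem alt_eq (l : List String) :
    list_rstrip_alt l =
      if kf l = 0 then []
      else (PySem.List.slice l none (some (kf l))).dropLast ++
        [PySem.Str.rstrip ((PySem.List.slice l none (some (kf l))).getLast?.getD "")] := rfl

theorem kf_append (l : List String) (a : String) :
    kf (l ++ [a]) = if PySem.Str.rstrip a = "" then kf l else (l.length : Int) + 1 := by
  unfold kf
  rw [PySem.List.enumerate_append, List.foldl_append]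
  simp [PySem.List.enumerate_cons, PySem.List.enumerate_nil]

theorem kf_bounds (l : List String) : 0 ≤ kf l ∧ kf l ≤ l.length := by
  induction l using List.reverseRecOn with
  | nil => simp [kf, PySem.List.enumerate_nil]
  | append_singleton l a ih =>
    rw [kf_append]
    split_ifs <;> simp [List.length_append] <;> omega

theorem a_nil : list_rstrip [] = [] := by rw [list_rstrip]; rfl

theorem a_append (l : List String) (a : String) :
    list_rstrip (l ++ [a]) =
      if PySem.Str.rstrip a = "" then list_rstrip l
      else l ++ [PySem.Str.rstrip a] := by
  rw [list_rstrip]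
  have hlen : (l ++ [a]).length ≠ 0 := by simp
  have hget : PySem.List.pyGet? (l ++ [a]) (-1) = some a := by
    simp [PySem.List.pyGet?, PySem.List.pyIdx?]
  rw [dif_neg hlen]
  simp only [hget, Option.getD_some, PySem.List.slice_to_neg_one, List.dropLast_concat]

-- ===== VERDICT (by name: the statement is the Claim_ definition above) =====
theorem ab_eq (l : List String) : list_rstrip l = list_rstrip_alt l := by
  induction l using List.reverseRecOn with
  | nil => rw [a_nil, alt_eq]; simp [kf, PySem.List.enumerate_nil]
  | append_singleton l a ih =>
    rw [a_append]
    by_cases h : PySem.Str.rstrip a = ""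
    · rw [if_pos h, ih, alt_eq, alt_eq, kf_append, if_pos h]
      obtain ⟨h0, h1⟩ := kf_bounds l
      by_cases hz : kf l = 0
      · simp [hz]
      · rw [if_neg hz, if_neg hz, PySem.List.slice_to _ h0, PySem.List.slice_to _ h0,
          List.take_append_of_le_length (by omega)]
    · rw [if_neg h, alt_eq, kf_append, if_neg h]
      have hnz : (l.length : Int) + 1 ≠ 0 := by positivity
      have hp : (0 : Int) ≤ (l.length : Int) + 1 := by positivity
      rw [if_neg hnz, PySem.List.slice_to _ hp]
      have : ((l.length : Int) + 1).toNat = (l ++ [a]).length := by simp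
      rw [this, List.take_length, List.dropLast_concat, List.getLast?_concat]
      rfl

theorem list_rstrip_spec : Claim_equal_list_rstrip := fun l _ => ab_eq l
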